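-- pv_equiv track=rewrite | github.com/nahyun2kim/APS | 프로그래머스/lv3/60059. 자물쇠와 열쇠/자물쇠와 열쇠.py | solution
-- ===== SOURCE A (Python) =====
-- def solution(key, lock):
--     n = len(lock)
--     m = len(key)
--     check = 0
--     for i in range(n):
--         for j in range(n):
--             if lock[i][j] == 0:
--                 check += 1
--     if check == 0:
--         return True
--     keys = []
--     for i in range(m):
--         for j in range(m):
--             if key[i][j] == 1:
--                 keys.append([i,j])
--     for d in range(4):
--         keys = rot90(keys, m)
--         for ii in range(-m+1, n):
--             for jj in range(-m+1, n):
--                 cnt = 0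
--                 flag = True
--                 for i, j in keys:
--                     di = i + ii
--                     dj = j + jj
--                     if 0<=di<n and 0<=dj<n:
--                         if lock[di][dj] == 1:
--                             flag = False
--                             break;
--                         else:
--                             cnt += 1
--                 if flag and cnt == check:
--                     return True
--
--     return False
--
-- def rot90(arr, n):
--     tmp = []
--     for i,j in arr:
--         tmp.append([j,n-1-i])
--     return tmp
-- ===== SOURCE B (Python) =====
-- def solution(key, lock):
--     # Pair-enumeration with hash aggregation: instead of verifying each offset by
--     # scanning cells, vote candidate offsets from (key-1-cell, lock-cell) pairs into
--     # a counter and a collision set, then look for a fully-voted, collision-free offset.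
--     n = len(lock)
--     m = len(key)
--     zeros = [(a, b) for a in range(n) for b in range(n) if lock[a][b] == 0]
--     check = len(zeros)
--     if check == 0:
--         return True
--     nonone = [(a, b) for a in range(n) for b in range(n) if lock[a][b] != 1]
--     ones = [(a, b) for a in range(n) for b in range(n) if lock[a][b] == 1]
--     grid = key
--     for _ in range(4):
--         grid = [[grid[m - 1 - j][i] for j in range(m)] for i in range(m)]
--         cells = [(i, j) for i in range(m) for j in range(m) if grid[i][j] == 1]
--         votes = {}
--         for (i, j) in cells:
--             for (a, b) in nonone:
--                 off = (a - i, b - j)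
--                 votes[off] = votes.get(off, 0) + 1
--         bad = set((a - i, b - j) for (i, j) in cells for (a, b) in ones)
--         if any(v == check and off not in bad for off, v in votes.items()):
--             return True
--     return False
-- ===== Notes on version B (the rewrite author's own statement) =====
-- stated objective: alternative
-- what changed: B removes A's per-offset verification scan entirely: per rotation it enumerates all (key-1-cell, lock-cell) pairs once, aggregates candidate offsets into a hash counter (offset -> overlap count) and a collision set of offsets hitting a lock 1, then succeeds iff some voted offset has exactly #zeros votes and is collision-free.
import Mathlib
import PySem

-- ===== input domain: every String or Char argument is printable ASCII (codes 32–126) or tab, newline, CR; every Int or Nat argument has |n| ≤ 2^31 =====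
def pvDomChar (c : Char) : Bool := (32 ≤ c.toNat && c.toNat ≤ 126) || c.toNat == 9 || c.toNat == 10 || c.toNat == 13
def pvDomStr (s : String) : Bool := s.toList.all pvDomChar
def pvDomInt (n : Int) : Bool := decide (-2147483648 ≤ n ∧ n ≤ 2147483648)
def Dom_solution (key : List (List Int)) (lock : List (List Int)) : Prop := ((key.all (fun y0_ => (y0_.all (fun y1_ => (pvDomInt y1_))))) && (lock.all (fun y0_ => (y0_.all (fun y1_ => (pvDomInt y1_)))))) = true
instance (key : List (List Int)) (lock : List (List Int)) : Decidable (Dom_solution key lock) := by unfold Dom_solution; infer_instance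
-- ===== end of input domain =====

-- B replaces A's per-offset verification scan by one pair enumeration per rotation
-- aggregated into an offset-vote counter and a collision set (objective: alternative).

-- ===== PORT A =====

-- lock[i][j] / key[i][j] with indices the loops keep in range (default never reached inside Pre_)
def pvAt (g : List (List Int)) (i j : Nat) : Int := (g.getD i []).getD j 0

def pvCheckA (lock : List (List Int)) (n : Nat) : Nat :=
  (List.range n).foldl (fun acc i =>
    (List.range n).foldl (fun acc j =>
      if pvAt lock i j == 0 then acc + 1 else acc) acc) 0

def pvKeysA (key : List (List Int)) (m : Nat) : List (Int × Int) :=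
  (List.range m).flatMap fun i =>
    (List.range m).filterMap fun j =>
      if pvAt key i j == 1 then some ((i : Int), (j : Int)) else none

def pvRot90 (arr : List (Int × Int)) (n : Int) : List (Int × Int) :=
  arr.map fun p => (p.2, n - 1 - p.1)

-- the inner 'for i, j in keys' loop with its break, carrying (cnt, flag)
def pvScanA (lock : List (List Int)) (n : Nat) (ii jj : Int) :
    List (Int × Int) → Nat → Nat × Bool
  | [], cnt => (cnt, true)
  | p :: rest, cnt =>
    let di := p.1 + ii
    let dj := p.2 + jj
    if 0 ≤ di ∧ di < (n : Int) ∧ 0 ≤ dj ∧ dj < (n : Int) then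
      if pvAt lock di.toNat dj.toNat == 1 then (cnt, false)
      else pvScanA lock n ii jj rest (cnt + 1)
    else pvScanA lock n ii jj rest cnt

def pvOffAnyA (lock : List (List Int)) (n m check : Nat) (ks : List (Int × Int)) : Bool :=
  (PySem.List.pyRange (-(m : Int) + 1) (n : Int) 1).any fun ii =>
    (PySem.List.pyRange (-(m : Int) + 1) (n : Int) 1).any fun jj =>
      let r := pvScanA lock n ii jj ks 0
      r.2 && (r.1 == check)

def pvLoopA (lock : List (List Int)) (n m check : Nat) : Nat → List (Int × Int) → Bool
  | 0, _ => false
  | d + 1, ks =>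
    let ks' := pvRot90 ks (m : Int)
    if pvOffAnyA lock n m check ks' then true else pvLoopA lock n m check d ks'

def solution (key : List (List Int)) (lock : List (List Int)) : Bool :=
  let n := lock.length
  let m := key.length
  let check := pvCheckA lock n
  if check == 0 then true
  else pvLoopA lock n m check 4 (pvKeysA key m)

-- ===== PORT B =====

-- the comprehensions '[(a,b) for a in range(nn) for b in range(nn) if pred(g[a][b])]'
def pvCellsOf (g : List (List Int)) (pred : Int → Bool) (nn : Nat) : List (Int × Int) :=
  (List.range nn).flatMap fun i =>
    (List.range nn).filterMap fun j =>
      if pred (pvAt g i j) then some ((i : Int), (j : Int)) else none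

def pvRotB (g : List (List Int)) (m : Nat) : List (List Int) :=
  (List.range m).map fun i => (List.range m).map fun j => pvAt g (m - 1 - j) i

-- '[(a - i, b - j) for (i, j) in cells for (a, b) in src]'
def pvOffsOf (cells src : List (Int × Int)) : List (Int × Int) :=
  cells.flatMap fun k => src.map fun ab => (ab.1 - k.1, ab.2 - k.2)

-- votes dict built by the nested vote loop + bad set + the final any over votes.items()
def pvAnyB (check : Nat) (cells nonone ones : List (Int × Int)) : Bool :=
  let votes := cells.foldl (fun d k =>
      nonone.foldl (fun d ab =>
        let off := (ab.1 - k.1, ab.2 - k.2)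
        d.insert off (d.getD off 0 + 1)) d)
    (PySem.Dict.empty : PySem.Dict (Int × Int) Int)
  let bad := PySem.Set.ofList (pvOffsOf cells ones)
  votes.items.any fun p => (p.2 == (check : Int)) && !(PySem.Set.contains bad p.1)

def pvLoopB (check m : Nat) (nonone ones : List (Int × Int)) :
    Nat → List (List Int) → Bool
  | 0, _ => false
  | d + 1, g =>
    let g' := pvRotB g m
    if pvAnyB check (pvCellsOf g' (fun v => v == 1) m) nonone ones then true
    else pvLoopB check m nonone ones d g'

def solution_alt (key : List (List Int)) (lock : List (List Int)) : Bool :=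
  let n := lock.length
  let m := key.length
  let check := (pvCellsOf lock (fun v => v == 0) n).length
  if check == 0 then true
  else pvLoopB check m (pvCellsOf lock (fun v => !(v == 1)) n)
         (pvCellsOf lock (fun v => v == 1) n) 4 key

-- ===== PRECONDITION & SPEC =====
-- Pre_ excludes exactly the inputs on which A raises IndexError: a lock row shorter
-- than len(lock), or — when some lock cell among the first n of a row is 0, so that
-- A goes on to read the key — a key row shorter than len(key).
def Pre_solution (key : List (List Int)) (lock : List (List Int)) : Prop :=
  (∀ row ∈ lock, lock.length ≤ row.length) ∧
  ((∃ row ∈ lock, (0 : Int) ∈ row.take lock.length) → ∀ row ∈ key, key.length ≤ row.length)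

instance (key : List (List Int)) (lock : List (List Int)) : Decidable (Pre_solution key lock) := by
  unfold Pre_solution; infer_instance

def pvWitness_solution : List (List Int) × List (List Int) := ([[1]], [[0]])

def Spec_solution (key : List (List Int)) (lock : List (List Int)) (out : Bool) : Prop := out = solution_alt key lock
instance (key : List (List Int)) (lock : List (List Int)) (out : Bool) : Decidable (Spec_solution key lock out) := by unfold Spec_solution; infer_instance

-- ===== CLAIM (what is proved, stated in full; the proofs are below) =====
def Claim_equal_solution : Prop := ∀ (key : List (List Int)) (lock : List (List Int)), Dom_solution key lock → Pre_solution key lock → Spec_solution key lock (solution key lock)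

-- ===== LEMMAS AND PROOFS =====

-- proof-only helpers
def pvInB (n : Nat) (ii jj : Int) (p : Int × Int) : Bool :=
  decide (0 ≤ p.1 + ii ∧ p.1 + ii < (n : Int) ∧ 0 ≤ p.2 + jj ∧ p.2 + jj < (n : Int))

def pvGood (lock : List (List Int)) (n : Nat) (ii jj : Int) (p : Int × Int) : Bool :=
  !(pvInB n ii jj p && (pvAt lock (p.1 + ii).toNat (p.2 + jj).toNat == 1))

def pvMemSpec (g : List (List Int)) (m : Nat) (p : Int × Int) : Prop :=
  ∃ i j : Nat, i < m ∧ j < m ∧ p = ((i : Int), (j : Int)) ∧ pvAt g i j = 1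

theorem pvScanA_snd (lock : List (List Int)) (n : Nat) (ii jj : Int) :
    ∀ (K : List (Int × Int)) (cnt : Nat),
      (pvScanA lock n ii jj K cnt).2 = K.all (pvGood lock n ii jj) := by
  intro K
  induction K with
  | nil => intro cnt; simp [pvScanA]
  | cons p rest ih =>
    intro cnt
    simp only [pvScanA, List.all_cons, pvGood, pvInB]
    split_ifs with h h2 <;> simp [*]

theorem pvScanA_fst (lock : List (List Int)) (n : Nat) (ii jj : Int) :
    ∀ (K : List (Int × Int)) (cnt : Nat),
      K.all (pvGood lock n ii jj) = true →
      (pvScanA lock n ii jj K cnt).1 = cnt + K.countP (pvInB n ii jj) := by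
  intro K
  induction K with
  | nil => intro cnt _; simp [pvScanA]
  | cons p rest ih =>
    intro cnt hall
    rw [List.all_cons] at hall
    simp only [pvScanA]
    split_ifs with h h2
    · exfalso
      simp [pvGood, pvInB, h, h2] at hall
    · rw [ih _ (by exact (Bool.and_eq_true _ _ |>.mp hall).2)]
      rw [List.countP_cons]
      simp only [pvInB, h]
      simp; omega
    · rw [ih _ (by exact (Bool.and_eq_true _ _ |>.mp hall).2)]
      rw [List.countP_cons]
      simp only [pvInB, h]
      simp

theorem pv_mem_cells (g : List (List Int)) (pred : Int → Bool) (nn : Nat) (p : Int × Int) :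
    p ∈ pvCellsOf g pred nn ↔
      ∃ a b : Nat, a < nn ∧ b < nn ∧ p = ((a : Int), (b : Int)) ∧ pred (pvAt g a b) = true := by
  simp only [pvCellsOf, List.mem_flatMap, List.mem_filterMap, List.mem_range]
  constructor
  · rintro ⟨i, hi, j, hj, heq⟩
    split at heq
    · rename_i hat
      refine ⟨i, j, hi, hj, ?_, hat⟩
      exact (Option.some.injEq _ _ ▸ heq).symm
    · exact absurd heq (by simp)
  · rintro ⟨a, b, ha, hb, rfl, hat⟩
    exact ⟨a, ha, b, hb, by simp [hat]⟩

theorem pv_block_fst (g : List (List Int)) (pred : Int → Bool) (nn i : Nat) (c : Int × Int)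
    (hc : c ∈ (List.range nn).filterMap fun j =>
        if pred (pvAt g i j) then some ((i : Int), (j : Int)) else none) :
    c.1 = (i : Int) := by
  rw [List.mem_filterMap] at hc
  obtain ⟨j, _, heq⟩ := hc
  split at heq
  · cases heq; rfl
  · exact absurd heq (by simp)

theorem pv_nodup_cells (g : List (List Int)) (pred : Int → Bool) (nn : Nat) :
    (pvCellsOf g pred nn).Nodup := by
  unfold pvCellsOf
  rw [List.nodup_flatMap]
  constructor
  · intro i _
    refine List.Nodup.filterMap ?_ (List.nodup_range)
    intro a b c hca hcb
    have ha : c = ((i : Int), (a : Int)) := by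
      split at hca
      · exact (Option.mem_some_iff.mp hca).symm
      · exact absurd hca (by simp)
    have hb : c = ((i : Int), (b : Int)) := by
      split at hcb
      · exact (Option.mem_some_iff.mp hcb).symm
      · exact absurd hcb (by simp)
    have hab : ((a : Int)) = ((b : Int)) := congrArg Prod.snd (ha.symm.trans hb)
    exact_mod_cast hab
  · refine List.Pairwise.imp ?_ (List.pairwise_lt_range)
    intro i i' hlt c hci hci'
    have h1 := pv_block_fst g pred nn i c hci
    have h2 := pv_block_fst g pred nn i' c hci'
    rw [h1] at h2
    exact absurd (by exact_mod_cast h2) (by omega)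

theorem pv_mem_cells_one (g : List (List Int)) (m : Nat) (p : Int × Int) :
    p ∈ pvCellsOf g (fun v => v == 1) m ↔ pvMemSpec g m p := by
  rw [pv_mem_cells]
  simp [pvMemSpec]

theorem pv_nodup_rot90 (K : List (Int × Int)) (m : Int) (h : K.Nodup) :
    (pvRot90 K m).Nodup := by
  refine h.map ?_
  intro a b hab
  simp only [Prod.mk.injEq] at hab
  exact Prod.ext (by omega) (by omega)

theorem pv_at_rotB (g : List (List Int)) (m i j : Nat) (hi : i < m) (hj : j < m) :
    pvAt (pvRotB g m) i j = pvAt g (m - 1 - j) i := by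
  unfold pvAt pvRotB
  rw [PySem.List.getD_map_range _ _ _ _ hi, PySem.List.getD_map_range _ _ _ _ hj]
  rfl

theorem pv_mem_rot_step (g : List (List Int)) (m : Nat) (K : List (Int × Int))
    (hK : ∀ p, p ∈ K ↔ pvMemSpec g m p) :
    ∀ p, p ∈ pvRot90 K (m : Int) ↔ pvMemSpec (pvRotB g m) m p := by
  intro p
  simp only [pvRot90, List.mem_map]
  constructor
  · rintro ⟨q, hq, rfl⟩
    obtain ⟨i, j, hi, hj, rfl, hat⟩ := (hK q).mp hq
    refine ⟨j, m - 1 - i, hj, by omega, ?_, ?_⟩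
    · have : ((m : Int) - 1 - (i : Int)) = ((m - 1 - i : Nat) : Int) := by
        omega
      simp [this]
    · rw [pv_at_rotB g m j (m - 1 - i) hj (by omega)]
      have : m - 1 - (m - 1 - i) = i := by omega
      rw [this]; exact hat
  · rintro ⟨a, b, ha, hb, rfl, hat⟩
    refine ⟨(((m - 1 - b : Nat) : Int), ((a : Nat) : Int)), ?_, ?_⟩
    · refine (hK _).mpr ⟨m - 1 - b, a, by omega, ha, rfl, ?_⟩
      rw [← pv_at_rotB g m a b ha hb]; exact hat
    · have hb' : (m : Int) - 1 - ((m - 1 - b : Nat) : Int) = (b : Int) := by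
        omega
      simp [hb']

theorem pv_mem_cells_shift (lock : List (List Int)) (pred : Int → Bool) (n : Nat)
    (ii jj : Int) (k : Int × Int) :
    ((k.1 + ii, k.2 + jj) ∈ pvCellsOf lock pred n) ↔
      (pvInB n ii jj k = true ∧
        pred (pvAt lock (k.1 + ii).toNat (k.2 + jj).toNat) = true) := by
  rw [pv_mem_cells]
  constructor
  · rintro ⟨a, b, ha, hb, heq, hp⟩
    rw [Prod.ext_iff] at heq
    obtain ⟨h1, h2⟩ := heq
    simp only at h1 h2
    refine ⟨by simp only [pvInB, decide_eq_true_eq]; omega, ?_⟩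
    have ha' : (k.1 + ii).toNat = a := by omega
    have hb' : (k.2 + jj).toNat = b := by omega
    rw [ha', hb']; exact hp
  · rintro ⟨hin, hp⟩
    simp only [pvInB, decide_eq_true_eq] at hin
    refine ⟨(k.1 + ii).toNat, (k.2 + jj).toNat, by omega, by omega, ?_, hp⟩
    rw [Prod.ext_iff]
    constructor <;> simp <;> omega

theorem pv_good_iff (lock : List (List Int)) (n : Nat) (ii jj : Int) (k : Int × Int) :
    pvGood lock n ii jj k = false ↔
      (k.1 + ii, k.2 + jj) ∈ pvCellsOf lock (fun v => v == 1) n := by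
  rw [pv_mem_cells_shift]
  simp [pvGood]

theorem pv_inb_iff_mem_nonone (lock : List (List Int)) (n : Nat) (ii jj : Int)
    (k : Int × Int) (hgood : pvGood lock n ii jj k = true) :
    pvInB n ii jj k =
      decide ((k.1 + ii, k.2 + jj) ∈ pvCellsOf lock (fun v => !(v == 1)) n) := by
  by_cases h : pvInB n ii jj k = true
  · rw [h]; symm; rw [decide_eq_true_iff, pv_mem_cells_shift]
    refine ⟨h, ?_⟩
    simp only [pvGood, h, Bool.true_and, Bool.not_eq_true'] at hgood
    simp [hgood]
  · rw [Bool.not_eq_true] at h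
    rw [h]; symm; rw [decide_eq_false_iff_not, pv_mem_cells_shift]
    rintro ⟨h1, _⟩
    rw [h] at h1; exact absurd h1 (by simp)

theorem pv_count_offs (S src : List (Int × Int)) (hsrc : src.Nodup) (off : Int × Int) :
    (pvOffsOf S src).count off
      = S.countP (fun k => decide ((k.1 + off.1, k.2 + off.2) ∈ src)) := by
  induction S with
  | nil => simp [pvOffsOf]
  | cons k rest ih =>
    simp only [pvOffsOf, List.flatMap_cons, List.count_append, List.countP_cons]
    rw [show (List.flatMap (fun k => src.map fun ab => (ab.1 - k.1, ab.2 - k.2)) rest).count off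
        = (pvOffsOf rest src).count off from rfl, ih]
    have hmap : (src.map fun ab => (ab.1 - k.1, ab.2 - k.2)).count off
        = src.count (k.1 + off.1, k.2 + off.2) := by
      show (src.map fun ab => (ab.1 - k.1, ab.2 - k.2)).countP (· == off)
          = src.countP (· == (k.1 + off.1, k.2 + off.2))
      rw [List.countP_map]
      refine List.countP_congr ?_
      intro ab _
      simp only [Function.comp_apply, beq_iff_eq, Prod.ext_iff]
      constructor <;> (rintro ⟨h1, h2⟩; exact ⟨by omega, by omega⟩)
    rw [hmap]
    by_cases hm : (k.1 + off.1, k.2 + off.2) ∈ src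
    · rw [List.count_eq_one_of_mem hsrc hm, if_pos (by simpa using hm)]
      omega
    · rw [List.count_eq_zero.mpr hm, if_neg (by simpa using hm)]
      omega

theorem pv_mem_offs (S src : List (Int × Int)) (off : Int × Int) :
    off ∈ pvOffsOf S src ↔ ∃ k ∈ S, (k.1 + off.1, k.2 + off.2) ∈ src := by
  simp only [pvOffsOf, List.mem_flatMap, List.mem_map]
  constructor
  · rintro ⟨k, hk, ab, hab, heq⟩
    refine ⟨k, hk, ?_⟩
    have hab' : ab = (k.1 + off.1, k.2 + off.2) := by
      rw [Prod.ext_iff] at heq ⊢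
      obtain ⟨h1, h2⟩ := heq
      constructor <;> simp only at h1 h2 ⊢ <;> omega
    rwa [hab'] at hab
  · rintro ⟨k, hk, hmem⟩
    refine ⟨k, hk, _, hmem, ?_⟩
    rw [Prod.ext_iff]
    constructor <;> simp

theorem pv_contains_ofList {α : Type} [BEq α] [LawfulBEq α] (l : List α) (x : α) :
    PySem.Set.contains (PySem.Set.ofList l) x = l.contains x := by
  rw [Bool.eq_iff_iff]
  show List.contains (PySem.Set.ofList l) x = true ↔ _
  rw [List.contains_iff_mem, List.contains_iff_mem]
  exact PySem.Set.mem_ofList _ _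

theorem pv_offset_eq (lock : List (List Int)) (n check : Nat) (ii jj : Int)
    (S : List (Int × Int)) :
    ((pvScanA lock n ii jj S 0).2 && ((pvScanA lock n ii jj S 0).1 == check))
    = (((pvOffsOf S (pvCellsOf lock (fun v => !(v == 1)) n)).count (ii, jj) == check)
        && !((pvOffsOf S (pvCellsOf lock (fun v => v == 1) n)).contains (ii, jj))) := by
  rw [pvScanA_snd]
  by_cases hall : S.all (pvGood lock n ii jj) = true
  · rw [hall, pvScanA_fst lock n ii jj S 0 hall, Bool.true_and]
    have hnc : ((pvOffsOf S (pvCellsOf lock (fun v => v == 1) n)).contains (ii, jj)) = false := by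
      rw [← Bool.not_eq_true]
      intro hc
      have hmem := List.contains_iff_mem.mp hc
      obtain ⟨k, hk, hone⟩ := (pv_mem_offs _ _ _).mp hmem
      have hg := (List.all_eq_true.mp hall) k hk
      rw [← pv_good_iff lock n ii jj k] at hone
      rw [hg] at hone
      exact absurd hone (by simp)
    rw [hnc, Bool.not_false, Bool.and_true, Nat.zero_add]
    have hcnt : S.countP (pvInB n ii jj)
        = (pvOffsOf S (pvCellsOf lock (fun v => !(v == 1)) n)).count (ii, jj) := by
      rw [pv_count_offs _ _ (pv_nodup_cells _ _ _) (ii, jj)]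
      refine List.countP_congr ?_
      intro k hk
      show pvInB n ii jj k = true ↔
        decide ((k.1 + ii, k.2 + jj) ∈ pvCellsOf lock (fun v => !(v == 1)) n) = true
      rw [pv_inb_iff_mem_nonone lock n ii jj k ((List.all_eq_true.mp hall) k hk)]
    rw [hcnt]
  · rw [Bool.not_eq_true] at hall
    rw [hall, Bool.false_and]
    obtain ⟨k, hk, hgk⟩ := List.all_eq_false.mp hall
    have hone : (k.1 + ii, k.2 + jj) ∈ pvCellsOf lock (fun v => v == 1) n :=
      (pv_good_iff lock n ii jj k).mp (by simpa using hgk)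
    have hmem : (ii, jj) ∈ pvOffsOf S (pvCellsOf lock (fun v => v == 1) n) :=
      (pv_mem_offs _ _ _).mpr ⟨k, hk, hone⟩
    rw [List.contains_iff_mem.mpr hmem]
    simp

theorem pv_rot_any_eq (lock : List (List Int)) (n m check : Nat) (hchk : check ≠ 0)
    (g : List (List Int)) (S' : List (Int × Int))
    (hperm : S'.Perm (pvCellsOf g (fun v => v == 1) m)) :
    pvOffAnyA lock n m check S'
      = pvAnyB check (pvCellsOf g (fun v => v == 1) m)
          (pvCellsOf lock (fun v => !(v == 1)) n) (pvCellsOf lock (fun v => v == 1) n) := by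
  have hpermN : (pvOffsOf S' (pvCellsOf lock (fun v => !(v == 1)) n)).Perm
      (pvOffsOf (pvCellsOf g (fun v => v == 1) m) (pvCellsOf lock (fun v => !(v == 1)) n)) :=
    hperm.flatMap (fun a _ => List.Perm.refl _)
  have hpermO : (pvOffsOf S' (pvCellsOf lock (fun v => v == 1) n)).Perm
      (pvOffsOf (pvCellsOf g (fun v => v == 1) m) (pvCellsOf lock (fun v => v == 1) n)) :=
    hperm.flatMap (fun a _ => List.Perm.refl _)
  have hL : pvOffAnyA lock n m check S'
      = (PySem.List.pyRange (-(m : Int) + 1) (n : Int) 1).any fun ii =>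
          (PySem.List.pyRange (-(m : Int) + 1) (n : Int) 1).any fun jj =>
            (((pvOffsOf (pvCellsOf g (fun v => v == 1) m)
                (pvCellsOf lock (fun v => !(v == 1)) n)).count (ii, jj) == check)
              && !((pvOffsOf (pvCellsOf g (fun v => v == 1) m)
                (pvCellsOf lock (fun v => v == 1) n)).contains (ii, jj))) := by
    unfold pvOffAnyA
    congr 1
    funext ii
    congr 1
    funext jj
    rw [pv_offset_eq, hpermN.count_eq]
    have hcon : (pvOffsOf S' (pvCellsOf lock (fun v => v == 1) n)).contains (ii, jj)
        = (pvOffsOf (pvCellsOf g (fun v => v == 1) m)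
            (pvCellsOf lock (fun v => v == 1) n)).contains (ii, jj) := by
      rw [Bool.eq_iff_iff]
      simp only [List.contains_iff_mem]
      exact hpermO.mem_iff
    rw [hcon]
  have hR : pvAnyB check (pvCellsOf g (fun v => v == 1) m)
        (pvCellsOf lock (fun v => !(v == 1)) n) (pvCellsOf lock (fun v => v == 1) n)
      = (PySem.Set.ofList (pvOffsOf (pvCellsOf g (fun v => v == 1) m)
            (pvCellsOf lock (fun v => !(v == 1)) n))).any fun off =>
          (((pvOffsOf (pvCellsOf g (fun v => v == 1) m)
              (pvCellsOf lock (fun v => !(v == 1)) n)).count off == check)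
            && !((pvOffsOf (pvCellsOf g (fun v => v == 1) m)
              (pvCellsOf lock (fun v => v == 1) n)).contains off)) := by
    simp only [pvAnyB]
    have hv : ∀ (cells nonone : List (Int × Int)),
        cells.foldl (fun d k =>
          nonone.foldl (fun d ab =>
            let off := (ab.1 - k.1, ab.2 - k.2)
            d.insert off (d.getD off 0 + 1)) d)
          (PySem.Dict.empty : PySem.Dict (Int × Int) Int)
        = (pvOffsOf cells nonone).foldl (fun d x => d.insert x (d.getD x 0 + 1))
            PySem.Dict.empty := by
      intro cells nonone
      unfold pvOffsOf
      rw [List.foldl_flatMap]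
      congr 1
      funext d k
      rw [List.foldl_map]
    rw [hv, PySem.Dict.foldl_insert_getD_add_one_eq_counter, PySem.Dict.items_counter,
      List.any_map]
    congr 1
    funext off
    simp only [Function.comp_apply, pv_contains_ofList]
    congr 1
    rw [Bool.eq_iff_iff, beq_iff_eq, beq_iff_eq]
    exact_mod_cast Iff.rfl
  rw [hL, hR, Bool.eq_iff_iff, List.any_eq_true, List.any_eq_true]
  constructor
  · rintro ⟨ii, _, h2⟩
    rw [List.any_eq_true] at h2
    obtain ⟨jj, _, hp⟩ := h2
    refine ⟨(ii, jj), ?_, hp⟩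
    have hc : (pvOffsOf (pvCellsOf g (fun v => v == 1) m)
        (pvCellsOf lock (fun v => !(v == 1)) n)).count (ii, jj) = check := by
      have := (Bool.and_eq_true _ _ |>.mp hp).1
      simpa using this
    have hpos : (ii, jj) ∈ pvOffsOf (pvCellsOf g (fun v => v == 1) m)
        (pvCellsOf lock (fun v => !(v == 1)) n) :=
      List.count_pos_iff.mp (by omega)
    exact (PySem.Set.mem_ofList _ _).mpr hpos
  · rintro ⟨off, hoff, hp⟩
    have hmem : off ∈ pvOffsOf (pvCellsOf g (fun v => v == 1) m)
        (pvCellsOf lock (fun v => !(v == 1)) n) := (PySem.Set.mem_ofList _ _).mp hoff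
    obtain ⟨k, hk, hq⟩ := (pv_mem_offs _ _ _).mp hmem
    obtain ⟨i, j, him, hjm, hkeq, _⟩ := (pv_mem_cells _ _ _ _).mp hk
    obtain ⟨a, b, han, hbn, habeq, _⟩ := (pv_mem_cells _ _ _ _).mp hq
    rw [Prod.ext_iff] at hkeq habeq
    obtain ⟨hk1, hk2⟩ := hkeq
    obtain ⟨hab1, hab2⟩ := habeq
    simp only at hk1 hk2 hab1 hab2
    refine ⟨off.1, ?_, ?_⟩
    · rw [PySem.List.mem_pyRange_one]
      constructor <;> omega
    · rw [List.any_eq_true]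
      refine ⟨off.2, ?_, ?_⟩
      · rw [PySem.List.mem_pyRange_one]
        constructor <;> omega
      · simpa using hp

theorem pv_loop_eq (lock : List (List Int)) (n m check : Nat) (hchk : check ≠ 0) :
    ∀ (d : Nat) (K : List (Int × Int)) (g : List (List Int)),
      K.Nodup → (∀ p, p ∈ K ↔ pvMemSpec g m p) →
      pvLoopA lock n m check d K
        = pvLoopB check m (pvCellsOf lock (fun v => !(v == 1)) n)
            (pvCellsOf lock (fun v => v == 1) n) d g := by
  intro d
  induction d with
  | zero => intros; rfl
  | succ d ih =>
    intro K g hnd hmem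
    have hnd' : (pvRot90 K (m : Int)).Nodup := pv_nodup_rot90 _ _ hnd
    have hmem' := pv_mem_rot_step g m K hmem
    have hperm : (pvRot90 K (m : Int)).Perm (pvCellsOf (pvRotB g m) (fun v => v == 1) m) :=
      (List.perm_ext_iff_of_nodup hnd' (pv_nodup_cells _ _ _)).mpr
        (fun p => (hmem' p).trans (pv_mem_cells_one _ _ _).symm)
    simp only [pvLoopA, pvLoopB]
    rw [pv_rot_any_eq lock n m check hchk (pvRotB g m) _ hperm]
    by_cases hc : pvAnyB check (pvCellsOf (pvRotB g m) (fun v => v == 1) m)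
        (pvCellsOf lock (fun v => !(v == 1)) n) (pvCellsOf lock (fun v => v == 1) n) = true
    · simp [hc]
    · rw [Bool.not_eq_true] at hc
      simp only [hc]
      rw [if_neg (by simp)]
      exact ih _ _ hnd' hmem'

theorem pv_foldl_count {α : Type} (p : α → Bool) :
    ∀ (l : List α) (acc : Nat),
      l.foldl (fun a x => if p x then a + 1 else a) acc = acc + l.countP p := by
  intro l
  induction l with
  | nil => intro acc; simp
  | cons x rest ih =>
    intro acc
    simp only [List.foldl_cons, List.countP_cons]
    split_ifs with h <;> rw [ih] <;> omega

theorem pv_foldl_add {α : Type} (c : α → Nat) :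
    ∀ (l : List α) (acc : Nat),
      l.foldl (fun a x => a + c x) acc = acc + (l.map c).sum := by
  intro l
  induction l with
  | nil => intro acc; simp
  | cons x rest ih =>
    intro acc
    simp only [List.foldl_cons, List.map_cons, List.sum_cons]
    rw [ih]
    omega

theorem pv_len_cells (g : List (List Int)) (pred : Int → Bool) (nn : Nat) :
    (pvCellsOf g pred nn).length
      = ((List.range nn).map fun i => (List.range nn).countP fun j => pred (pvAt g i j)).sum := by
  unfold pvCellsOf
  rw [List.length_flatMap]
  congr 1
  refine List.map_congr_left ?_
  intro i _
  rw [List.length_filterMap_eq_countP]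
  refine List.countP_congr ?_
  intro j _
  split <;> simp [*]

theorem pv_check_eq (lock : List (List Int)) (n : Nat) :
    pvCheckA lock n = (pvCellsOf lock (fun v => v == 0) n).length := by
  unfold pvCheckA
  have hstep : ∀ (acc : Nat), ∀ i ∈ List.range n,
      (List.range n).foldl (fun acc j => if pvAt lock i j == 0 then acc + 1 else acc) acc
        = acc + (List.range n).countP (fun j => pvAt lock i j == 0) := by
    intro acc i _
    exact pv_foldl_count _ _ _
  rw [PySem.List.foldl_congr_mem _ _ _ _ hstep,
    pv_foldl_add (fun i => (List.range n).countP fun j => pvAt lock i j == 0) _ 0,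
    pv_len_cells]
  omega

-- ===== VERDICT (by name: the statement is the Claim_ definition above) =====
theorem solution_spec : Claim_equal_solution := by
  intro key lock _hdom _hpre
  show solution key lock = solution_alt key lock
  simp only [solution, solution_alt]
  rw [pv_check_eq lock lock.length]
  by_cases h0 : ((pvCellsOf lock (fun v => v == 0) lock.length).length == 0) = true
  · rw [if_pos h0, if_pos h0]
  · rw [if_neg h0, if_neg h0]
    have hchk : (pvCellsOf lock (fun v => v == 0) lock.length).length ≠ 0 := by
      simpa using h0
    have hkeys : pvKeysA key key.length = pvCellsOf key (fun v => v == 1) key.length := rfl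
    exact pv_loop_eq lock lock.length key.length _ hchk 4 (pvKeysA key key.length) key
      (hkeys ▸ pv_nodup_cells key (fun v => v == 1) key.length)
      (fun p => hkeys ▸ pv_mem_cells_one key key.length p)
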